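-- pv_equiv track=rewrite | github.com/yacoublambaz/EECE230PssSpring2022 | mar1st.py | ithDivisor
-- ===== SOURCE A (Python) =====
-- def ithDivisor(n,i):
--     """
--     1- Find all divisors -> store in a list
--     2- find the ith element of all divisors
--     3- if n <= 0 or i <= 0: return -1
--     4- if no divisor whatsoever, return -1
--     5- if you're asking for an index that's higher
--     than how many divisors we have, return -1
--     """
--     if n <= 0 or i <= 0:
--         return -1
--     store = []
--     for j in range(1,n+1):
--         if n % j == 0:
--             store.append(j)
--     if len(store) == 0: #no divisors
--         return -1
--     if i > len(store):
--         return -1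
--     return store[i-1]
-- ===== SOURCE B (Python) =====
-- def ithDivisor(n, i):
--     if n <= 0 or i <= 0:
--         return -1
--     small = []
--     large = []
--     d = 1
--     while d * d <= n:
--         if n % d == 0:
--             small.append(d)
--             q = n // d
--             if q != d:
--                 large.append(q)
--         d += 1
--     divisors = small + large[::-1]
--     if i > len(divisors):
--         return -1
--     return divisors[i - 1]
-- ===== Notes on version B (the rewrite author's own statement) =====
-- stated objective: faster
-- what changed: B replaces A's O(n) scan over 1..n with an O(sqrt(n)) loop that collects each divisor pair (d, n//d) up to the square root and concatenates the small half with the reversed large half, so no full scan and no sort is needed.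
import Mathlib
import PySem

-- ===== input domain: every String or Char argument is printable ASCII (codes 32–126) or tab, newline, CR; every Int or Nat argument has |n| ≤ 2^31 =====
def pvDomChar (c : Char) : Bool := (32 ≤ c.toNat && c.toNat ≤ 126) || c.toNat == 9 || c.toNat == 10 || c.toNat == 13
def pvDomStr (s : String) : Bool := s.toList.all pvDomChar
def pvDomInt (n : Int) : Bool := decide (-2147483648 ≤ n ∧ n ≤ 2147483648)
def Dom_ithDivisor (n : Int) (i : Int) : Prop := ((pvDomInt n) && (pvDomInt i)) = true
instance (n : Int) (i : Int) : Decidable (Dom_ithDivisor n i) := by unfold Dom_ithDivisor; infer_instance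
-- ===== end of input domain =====

-- B replaces A's O(n) scan of 1..n by an O(sqrt n) scan collecting divisor pairs (d, n//d),
-- concatenating the small half with the reversed large half (objective: faster, asymptotic).


-- ===== PORT A =====
def ithDivisor (n : Int) (i : Int) : Int :=
  if n ≤ 0 ∨ i ≤ 0 then -1
  else
    let store := (PySem.List.pyRange 1 (n+1) 1).foldl
      (fun acc j => if PySem.Int.mod n j == 0 then acc ++ [j] else acc) []
    if PySem.List.len store = 0 then -1
    else if i > PySem.List.len store then -1
    else PySem.List.pyGetD store (i-1) 0   -- store[i-1]; the guards ensure the index is in range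

-- ===== PORT B =====
-- the while loop of Source B: d counts up while d*d <= n, collecting (small, large)
def altLoop (n : Int) (d : Int) (small : List Int) (large : List Int) : List Int × List Int :=
  if d * d ≤ n then
    if PySem.Int.mod n d == 0 then
      let q := PySem.Int.floordiv n d
      altLoop n (d+1) (small ++ [d]) (if q ≠ d then large ++ [q] else large)
    else altLoop n (d+1) small large
  else (small, large)
termination_by (n + 1 - d).toNat
decreasing_by
  all_goals
    rename_i h _
    have h1 : 2*d ≤ n+1 := by nlinarith [mul_self_nonneg (d-1)]
    have h2 : (0:Int) ≤ n := by nlinarith [mul_self_nonneg d]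
    omega

def ithDivisor_alt (n : Int) (i : Int) : Int :=
  if n ≤ 0 ∨ i ≤ 0 then -1
  else
    let p := altLoop n 1 [] []
    let divisors := p.1 ++ (PySem.List.slice? p.2 none none (-1)).getD []  -- small + large[::-1]
    if i > PySem.List.len divisors then -1
    else PySem.List.pyGetD divisors (i-1) 0

-- ===== PRECONDITION & SPEC =====
def Spec_ithDivisor (n : Int) (i : Int) (out : Int) : Prop := out = ithDivisor_alt n i
instance (n : Int) (i : Int) (out : Int) : Decidable (Spec_ithDivisor n i out) := by unfold Spec_ithDivisor; infer_instance

-- ===== CLAIM (what is proved, stated in full; the proofs are below) =====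
def Claim_equal_ithDivisor : Prop := ∀ (n : Int) (i : Int), Dom_ithDivisor n i → Spec_ithDivisor n i (ithDivisor n i)

-- ===== LEMMAS AND PROOFS =====

-- integer square root of n (as an Int), the loop bound of B
def sN (n : Int) : Int := (Nat.sqrt n.toNat : Int)

-- the two halves B collects, in closed range/filter form
def smDivs (n d : Int) : List Int :=
  (PySem.List.pyRange d (sN n + 1) 1).filter (fun j => PySem.Int.mod n j == 0)
def lgDivs (n d : Int) : List Int :=
  ((smDivs n d).filter (fun j => decide (PySem.Int.floordiv n j ≠ j))).map
    (fun j => PySem.Int.floordiv n j)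

lemma sN_nonneg (n : Int) : 0 ≤ sN n := Int.natCast_nonneg _

lemma sq_sN_le (n : Int) (hn : 0 ≤ n) : sN n * sN n ≤ n := by
  have h := Nat.sqrt_le' n.toNat
  rw [pow_two] at h
  have := Int.toNat_of_nonneg hn
  unfold sN
  omega

lemma lt_succ_sN (n : Int) (hn : 0 ≤ n) : n < (sN n + 1) * (sN n + 1) := by
  have h := Nat.lt_succ_sqrt' n.toNat
  rw [Nat.succ_eq_add_one, pow_two] at h
  unfold sN
  have h2 : ((n.toNat : Int)) < ((Nat.sqrt n.toNat + 1 : Nat) : Int) * ((Nat.sqrt n.toNat + 1 : Nat) : Int) := by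
    exact_mod_cast h
  push_cast at h2
  linarith [Int.toNat_of_nonneg hn]

lemma le_sN_iff (n d : Int) (hn : 0 ≤ n) (hd : 1 ≤ d) : d ≤ sN n ↔ d * d ≤ n := by
  constructor
  · intro h
    have := sq_sN_le n hn
    nlinarith
  · intro h
    by_contra hc
    push Not at hc
    have h1 : sN n + 1 ≤ d := hc
    have h2 := mul_le_mul h1 h1 (by have := sN_nonneg n; omega) (by omega)
    have := lt_succ_sN n hn
    nlinarith

lemma smDivs_nil (n d : Int) (h : sN n < d) : smDivs n d = [] := by
  unfold smDivs
  rw [PySem.List.pyRange_one_eq_nil (by omega)]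
  rfl

lemma lgDivs_nil (n d : Int) (h : sN n < d) : lgDivs n d = [] := by
  unfold lgDivs
  rw [smDivs_nil n d h]
  rfl

lemma smDivs_cons (n d : Int) (h : d ≤ sN n) :
    smDivs n d = if PySem.Int.mod n d == 0 then d :: smDivs n (d+1) else smDivs n (d+1) := by
  unfold smDivs
  rw [PySem.List.pyRange_one_cons (by omega), List.filter_cons]

lemma altLoop_spec : ∀ (k : Nat) (n d : Int), 0 ≤ n → (n + 1 - d).toNat = k → 1 ≤ d →
    ∀ small large, altLoop n d small large = (small ++ smDivs n d, large ++ lgDivs n d) := by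
  intro k
  induction k using Nat.strong_induction_on with
  | _ k ih =>
    intro n d hn hk hd small large
    rw [altLoop]
    by_cases h : d * d ≤ n
    · have hds : d ≤ sN n := (le_sN_iff n d hn hd).mpr h
      have hdn : d ≤ n := by nlinarith
      rw [if_pos h]
      rw [smDivs_cons n d hds]
      have hrec := ih (n + 1 - (d+1)).toNat (by omega) n (d+1) hn rfl (by omega)
      by_cases hm : (PySem.Int.mod n d == 0) = true
      · rw [if_pos hm, if_pos hm, hrec]
        unfold lgDivs
        rw [smDivs_cons n d hds, if_pos hm, List.filter_cons]
        by_cases hq : PySem.Int.floordiv n d ≠ d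
        · simp [hq]
        · simp [hq]
      · rw [if_neg hm, if_neg hm, hrec]
        unfold lgDivs
        rw [smDivs_cons n d hds, if_neg hm]
    · have hds : sN n < d := by
        by_contra hc
        push Not at hc
        exact h ((le_sN_iff n d hn hd).mp hc)
      rw [if_neg h, smDivs_nil n d hds, lgDivs_nil n d hds]
      simp

lemma fd_eq (n j c : Int) (hj : 1 ≤ j) (hc : n = j * c) : PySem.Int.floordiv n j = c := by
  rw [PySem.Int.floordiv_eq_ediv_of_pos (by omega), hc, Int.mul_ediv_cancel_left _ (by omega)]

lemma mem_smDivs (n d x : Int) : x ∈ smDivs n d ↔ (d ≤ x ∧ x ≤ sN n) ∧ PySem.Int.mod n x = 0 := by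
  unfold smDivs
  rw [List.mem_filter, PySem.List.mem_pyRange_one]
  simp only [beq_iff_eq]
  omega

lemma mem_B (n x : Int) (hn : 1 ≤ n) :
    x ∈ smDivs n 1 ++ (lgDivs n 1).reverse ↔ 1 ≤ x ∧ x ≤ n ∧ x ∣ n := by
  constructor
  · intro hx
    rcases List.mem_append.mp hx with hx | hx
    · rcases (mem_smDivs n 1 x).mp hx with ⟨⟨h1, h2⟩, h3⟩
      have hdvd : x ∣ n := (PySem.Int.mod_eq_zero_iff_dvd n x).mp h3
      have := sq_sN_le n (by omega)
      exact ⟨h1, by nlinarith, hdvd⟩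
    · rw [List.mem_reverse] at hx
      unfold lgDivs at hx
      rcases List.mem_map.mp hx with ⟨j, hj, rfl⟩
      rcases List.mem_filter.mp hj with ⟨hjsm, _⟩
      rcases (mem_smDivs n 1 j).mp hjsm with ⟨⟨hj1, hj2⟩, hj3⟩
      rcases (PySem.Int.mod_eq_zero_iff_dvd n j).mp hj3 with ⟨c, hc⟩
      rw [fd_eq n j c (by omega) hc]
      have hc1 : 1 ≤ c := by nlinarith
      exact ⟨hc1, by nlinarith, ⟨j, by rw [hc, mul_comm]⟩⟩
  · rintro ⟨h1, h2, hdvd⟩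
    by_cases hxs : x ≤ sN n
    · exact List.mem_append.mpr (Or.inl ((mem_smDivs n 1 x).mpr
        ⟨⟨h1, hxs⟩, (PySem.Int.mod_eq_zero_iff_dvd n x).mpr hdvd⟩))
    · push Not at hxs
      rcases hdvd with ⟨j, hj⟩
      have hj1 : 1 ≤ j := by nlinarith
      have hxx : n < x * x := by
        have h1' : sN n + 1 ≤ x := by omega
        have h2' := mul_le_mul h1' h1' (by have := sN_nonneg n; omega) (by omega)
        have := lt_succ_sN n (by omega)
        nlinarith
      have hjx : j < x := by nlinarith
      have hjs : j ≤ sN n := by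
        rw [le_sN_iff n j (by omega) hj1]
        nlinarith
      have hfd : PySem.Int.floordiv n j = x := fd_eq n j x (by omega) (by rw [hj, mul_comm])
      refine List.mem_append.mpr (Or.inr ?_)
      rw [List.mem_reverse]
      unfold lgDivs
      refine List.mem_map.mpr ⟨j, List.mem_filter.mpr ⟨(mem_smDivs n 1 j).mpr
        ⟨⟨hj1, hjs⟩, (PySem.Int.mod_eq_zero_iff_dvd n j).mpr ⟨x, by rw [hj, mul_comm]⟩⟩, ?_⟩, hfd⟩
      rw [hfd]
      simp only [decide_eq_true_eq]
      omega

lemma lg_mem_gt (n b : Int) (hn : 1 ≤ n) (hb : b ∈ lgDivs n 1) : sN n < b := by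
  unfold lgDivs at hb
  rcases List.mem_map.mp hb with ⟨j, hj, rfl⟩
  rcases List.mem_filter.mp hj with ⟨hjsm, hjne⟩
  rcases (mem_smDivs n 1 j).mp hjsm with ⟨⟨hj1, hj2⟩, hj3⟩
  rcases (PySem.Int.mod_eq_zero_iff_dvd n j).mp hj3 with ⟨c, hc⟩
  rw [fd_eq n j c (by omega) hc] at hjne ⊢
  simp only [decide_eq_true_eq] at hjne
  have hjj : j * j ≤ n := (le_sN_iff n j (by omega) hj1).mp hj2
  have hjc : j < c := by
    rcases lt_or_ge j c with h | h
    · exact h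
    · exfalso
      rcases eq_or_lt_of_le h with h' | h'
      · exact hjne h'
      · nlinarith
  by_contra hcb
  push Not at hcb
  have : c * c ≤ n := by
    have := (le_sN_iff n c (by omega) (by omega)).mp hcb
    omega
  nlinarith

lemma pairwise_smDivs (n d : Int) : (smDivs n d).Pairwise (· < ·) := by
  unfold smDivs
  exact (PySem.List.pairwise_lt_pyRange_one _ _).filter _

lemma pairwise_B (n : Int) (hn : 1 ≤ n) :
    (smDivs n 1 ++ (lgDivs n 1).reverse).Pairwise (· < ·) := by
  rw [List.pairwise_append]
  refine ⟨pairwise_smDivs n 1, ?_, ?_⟩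
  · rw [List.pairwise_reverse]
    unfold lgDivs
    rw [List.pairwise_map]
    refine List.Pairwise.imp_of_mem ?_ ((pairwise_smDivs n 1).filter _)
    intro a b ha hb hab
    rcases List.mem_filter.mp ha with ⟨hasm, _⟩
    rcases List.mem_filter.mp hb with ⟨hbsm, _⟩
    rcases (mem_smDivs n 1 a).mp hasm with ⟨⟨ha1, _⟩, ha3⟩
    rcases (mem_smDivs n 1 b).mp hbsm with ⟨⟨hb1, _⟩, hb3⟩
    rcases (PySem.Int.mod_eq_zero_iff_dvd n a).mp ha3 with ⟨ca, hca⟩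
    rcases (PySem.Int.mod_eq_zero_iff_dvd n b).mp hb3 with ⟨cb, hcb⟩
    rw [fd_eq n a ca (by omega) hca, fd_eq n b cb (by omega) hcb]
    show cb < ca
    have hcb1 : 1 ≤ cb := by nlinarith
    nlinarith [mul_lt_mul_of_pos_right hab (show (0:Int) < cb by omega)]
  · intro a ha b hb
    have ha' : a ≤ sN n := ((mem_smDivs n 1 a).mp ha).1.2
    have hb' : sN n < b := lg_mem_gt n b hn (List.mem_reverse.mp hb)
    omega

lemma lists_eq (n : Int) (hn : 1 ≤ n) :
    (PySem.List.pyRange 1 (n+1) 1).filter (fun j => PySem.Int.mod n j == 0)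
      = smDivs n 1 ++ (lgDivs n 1).reverse := by
  have hA : ((PySem.List.pyRange 1 (n+1) 1).filter
      (fun j => PySem.Int.mod n j == 0)).Pairwise (· < ·) :=
    (PySem.List.pairwise_lt_pyRange_one _ _).filter _
  have hB := pairwise_B n hn
  have hmem : ∀ x, x ∈ smDivs n 1 ++ (lgDivs n 1).reverse ↔
      x ∈ (PySem.List.pyRange 1 (n+1) 1).filter (fun j => PySem.Int.mod n j == 0) := by
    intro x
    rw [mem_B n x hn, List.mem_filter, PySem.List.mem_pyRange_one]
    simp only [beq_iff_eq, PySem.Int.mod_eq_zero_iff_dvd]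
    constructor
    · rintro ⟨h1, h2, h3⟩; exact ⟨⟨h1, by omega⟩, h3⟩
    · rintro ⟨⟨h1, h2⟩, h3⟩; exact ⟨h1, by omega, h3⟩
  have hperm : (smDivs n 1 ++ (lgDivs n 1).reverse).Perm
      ((PySem.List.pyRange 1 (n+1) 1).filter (fun j => PySem.Int.mod n j == 0)) :=
    (List.perm_ext_iff_of_nodup (hB.imp ne_of_lt) (hA.imp ne_of_lt)).mpr hmem
  have h1 := PySem.List.sorted_eq_of_perm_of_pairwise_lt _ _ id hperm hB
  have h2 := PySem.List.sorted_eq_self_of_pairwise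
    ((PySem.List.pyRange 1 (n+1) 1).filter (fun j => PySem.Int.mod n j == 0)) id
    (hA.imp (fun h => le_of_lt h))
  rw [h2] at h1
  exact h1

theorem ithDivisor_spec : Claim_equal_ithDivisor := by
  unfold Claim_equal_ithDivisor Spec_ithDivisor
  intro n i _
  unfold ithDivisor ithDivisor_alt
  by_cases hg : n ≤ 0 ∨ i ≤ 0
  · rw [if_pos hg, if_pos hg]
  · rw [if_neg hg, if_neg hg]
    push Not at hg
    obtain ⟨hn, hi⟩ := hg
    simp only [PySem.List.foldl_append_if_eq_filter, List.nil_append,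
      altLoop_spec (n + 1 - 1).toNat n 1 (by omega) rfl le_rfl [] [],
      PySem.List.slice?_none_none_neg_one, Option.getD_some,
      lists_eq n (by omega), PySem.List.len_eq]
    set L := smDivs n 1 ++ (lgDivs n 1).reverse with hL
    by_cases h0 : (L.length : Int) = 0
    · rw [if_pos h0, if_pos (by omega)]
    · rw [if_neg h0]
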